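-- pv_equiv track=rewrite | github.com/TimBerneiser/rosalind_solutions | 24_lgis/lgis.py | decr_perm
-- ===== SOURCE A (Python) =====
-- def decr_perm(low, permutation):
--     """ Give the longest decreasing permutation """
--
--     if permutation == []:
--         return([low])
--
--     if low < min(permutation):
--         return([low])
--
--     dec_perms = [low]
--     dec = []
--     for index in range(len(permutation)):
--         if low > permutation[index]:
--             dec = [low] + decr_perm(permutation[index], permutation[index+1:])
--         if len(dec) >= len(dec_perms):
--             dec_perms = dec
--
--     return(dec_perms)
-- ===== SOURCE B (Python) =====
-- def _select(bound, table):
--     """Last run of maximal length whose first element is below bound."""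
--     best = []
--     for run in table:
--         if run[0] < bound and len(run) >= len(best):
--             best = run
--     return best
--
--
-- def decr_perm(low, permutation):
--     """ Give the longest decreasing permutation """
--     # table[k] = best decreasing run starting at index k, built right to left
--     table = []
--     for x in reversed(permutation):
--         table.insert(0, [x] + _select(x, table))
--     return [low] + _select(low, table)
-- ===== Notes on version B (the rewrite author's own statement) =====
-- stated objective: faster
-- what changed: Replaces A's exponential branching recursion (re-solving every suffix at every level) by a single right-to-left O(n^2) dynamic-programming pass that tabulates the best decreasing run starting at each index, preserving A's latest-index tie-break (>= comparison).
import Mathlib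
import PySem

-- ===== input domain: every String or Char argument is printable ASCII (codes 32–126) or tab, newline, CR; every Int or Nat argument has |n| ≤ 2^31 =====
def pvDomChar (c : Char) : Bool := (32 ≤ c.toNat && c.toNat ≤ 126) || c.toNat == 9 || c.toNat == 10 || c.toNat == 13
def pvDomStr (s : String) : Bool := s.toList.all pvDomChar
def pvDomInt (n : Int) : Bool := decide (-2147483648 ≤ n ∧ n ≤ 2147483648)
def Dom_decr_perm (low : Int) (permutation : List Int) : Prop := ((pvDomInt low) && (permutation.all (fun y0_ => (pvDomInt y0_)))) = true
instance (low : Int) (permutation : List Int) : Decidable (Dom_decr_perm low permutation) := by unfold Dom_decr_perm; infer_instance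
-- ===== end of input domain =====

-- B replaces A's exponential branching recursion by an O(n^2) right-to-left table of best runs per start index (same values, same latest-index tie-break).

-- ===== PORT A =====
-- A's 'for index in range(len(permutation))' loop is the foldl over the index
-- range carrying the state (dec_perms, dec); 'attach' only supplies the bound
-- index ∈ range needed for termination.  permutation[index] is always in range
-- here, so pyGetD is exact.
def decr_perm (low : Int) (permutation : List Int) : List Int :=
  if permutation = [] then [low]
  else if low < ((PySem.List.min? permutation (fun x => x)).getD 0) then [low]
    -- permutation ≠ [] here, so min? is 'some'; getD is exact
  else
    ((List.range permutation.length).attach.foldl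
      (fun (st : List Int × List Int) x =>
        let dec :=
          if low > PySem.List.pyGetD permutation (x.1 : Int) 0 then
            low :: decr_perm (PySem.List.pyGetD permutation (x.1 : Int) 0)
                     (PySem.List.slice permutation (some ((x.1 : Int) + 1)) none)
          else st.2
        let dec_perms := if dec.length ≥ st.1.length then dec else st.1
        (dec_perms, dec))
      ([low], [])).1
termination_by permutation.length
decreasing_by
  have hin : x.1 < permutation.length := List.mem_range.mp x.2
  have hc : ((x.1 : Int) + 1) = ((x.1 + 1 : Nat) : Int) := by push_cast; ring
  rw [hc, PySem.List.slice_from_natCast]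
  simp [List.length_drop]
  omega

-- ===== PORT B =====
-- last run in 'table' of maximal length whose first element is below 'bound';
-- runs in the tables built below are never empty, so headD 0 is run[0] exactly.
def pvSelect (bound : Int) (table : List (List Int)) : List Int :=
  table.foldl
    (fun best run => if run.headD 0 < bound ∧ run.length ≥ best.length then run else best)
    []

-- Source B's 'for x in reversed(permutation): table.insert(0, [x] + _select(x, table))'
def pvBuildTable : List Int → List (List Int)
  | [] => []
  | x :: rest =>
    let t := pvBuildTable rest
    (x :: pvSelect x t) :: t

def decr_perm_alt (low : Int) (permutation : List Int) : List Int :=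
  low :: pvSelect low (pvBuildTable permutation)

-- ===== PRECONDITION & SPEC =====
def Spec_decr_perm (low : Int) (permutation : List Int) (out : List Int) : Prop := out = decr_perm_alt low permutation
instance (low : Int) (permutation : List Int) (out : List Int) : Decidable (Spec_decr_perm low permutation out) := by unfold Spec_decr_perm; infer_instance

-- ===== CLAIM (what is proved, stated in full; the proofs are below) =====
def Claim_equal_decr_perm : Prop := ∀ (low : Int) (permutation : List Int), Dom_decr_perm low permutation → Spec_decr_perm low permutation (decr_perm low permutation)

-- ===== LEMMAS AND PROOFS =====

theorem pvSelect_nil_of_head (bound : Int) (t : List (List Int))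
    (h : ∀ run ∈ t, ¬ run.headD 0 < bound) : pvSelect bound t = [] := by
  unfold pvSelect
  induction t with
  | nil => rfl
  | cons r rs ih =>
    have hr := h r (by simp)
    simp only [List.foldl_cons]
    rw [if_neg (fun hc => hr (by simpa [List.headD] using hc.1))]
    exact ih (fun run hm => h run (by simp [hm]))

theorem pvBuildTable_head_mem (perm : List Int) :
    ∀ run ∈ pvBuildTable perm, run.headD 0 ∈ perm := by
  induction perm with
  | nil => simp [pvBuildTable]
  | cons x rest ih =>
    intro run hm
    simp [pvBuildTable] at hm
    rcases hm with h | h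
    · simp [h]
    · exact List.mem_cons_of_mem _ (ih run h)

theorem pvFoldlAttachVal {α β : Type} (l : List α) (g : β → α → β) (init : β) :
    l.attach.foldl (fun st x => g st x.1) init = l.foldl g init := by
  induction l generalizing init with
  | nil => rfl
  | cons a tl ih =>
    simp only [List.attach_cons, List.foldl_cons, List.foldl_map]
    exact ih _

theorem decr_perm_loop_eq (low : Int) (perm : List Int)
    (IH : ∀ q : List Int, q.length < perm.length → ∀ l, decr_perm l q = decr_perm_alt l q) :
    ∀ k i s dec, perm.length - i = k →
      (dec = low :: s ∨ dec.length < s.length + 1) →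
      ∃ dec',
        (List.range' i k).foldl
          (fun (st : List Int × List Int) (index : Nat) =>
            let dec :=
              if low > PySem.List.pyGetD perm (index : Int) 0 then
                low :: decr_perm (PySem.List.pyGetD perm (index : Int) 0)
                         (PySem.List.slice perm (some ((index : Int) + 1)) none)
              else st.2
            let dec_perms := if dec.length ≥ st.1.length then dec else st.1
            (dec_perms, dec))
          (low :: s, dec) =
        (low :: (pvBuildTable (perm.drop i)).foldl
          (fun best run => if run.headD 0 < low ∧ run.length ≥ best.length then run else best) s,
         dec') := by
  intro k
  induction k with
  | zero =>
    intro i s dec hk _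
    refine ⟨dec, ?_⟩
    rw [List.range'_zero, List.foldl_nil]
    rw [List.drop_of_length_le (by omega)]
    simp [pvBuildTable]
  | succ k ihk =>
    intro i s dec hk hinv
    have hi : i < perm.length := by omega
    have hget : PySem.List.pyGetD perm (i : Int) 0 = perm[i] := by
      rw [PySem.List.pyGetD_natCast]
      exact List.getD_eq_getElem _ _ hi
    have hslice : PySem.List.slice perm (some ((i : Int) + 1)) none = perm.drop (i + 1) := by
      have hcast : ((i : Int) + 1) = ((i + 1 : Nat) : Int) := by push_cast; ring
      rw [hcast, PySem.List.slice_from_natCast]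
    have hdrop : perm.drop i = perm[i] :: perm.drop (i + 1) := by
      exact (List.getElem_cons_drop hi).symm
    have hrun : decr_perm perm[i] (perm.drop (i + 1)) =
        perm[i] :: pvSelect perm[i] (pvBuildTable (perm.drop (i + 1))) := by
      have hlen : (perm.drop (i + 1)).length < perm.length := by
        simp [List.length_drop]; omega
      exact IH _ hlen _
    rw [List.range'_succ, List.foldl_cons]
    rw [hdrop]
    simp only [pvBuildTable, List.foldl_cons]
    simp only [hget, hslice, hrun]
    set run := perm[i] :: pvSelect perm[i] (pvBuildTable (perm.drop (i + 1))) with hr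
    by_cases hc : low > perm[i]
    · rw [if_pos hc]
      by_cases hl : (low :: run).length ≥ (low :: s).length
      · rw [if_pos hl]
        rw [if_pos ⟨hc, by simp at hl ⊢; omega⟩]
        exact ihk (i + 1) run (low :: run) (by omega) (Or.inl rfl)
      · rw [if_neg hl]
        rw [if_neg (fun hcc => hl (by simp at hcc ⊢; omega))]
        exact ihk (i + 1) s (low :: run) (by omega) (Or.inr (by simp at hl ⊢; omega))
    · rw [if_neg hc]
      have hdp : (if dec.length ≥ (low :: s).length then dec else low :: s) = low :: s := by
        rcases hinv with h1 | h1
        · rw [h1]; simp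
        · rw [if_neg (by simp; omega)]
      rw [hdp]
      rw [if_neg (fun hcc => hc (by simpa [hr] using hcc.1))]
      exact ihk (i + 1) s dec (by omega) hinv

theorem decr_perm_eq (n : Nat) : ∀ perm : List Int, perm.length ≤ n →
    ∀ low, decr_perm low perm = decr_perm_alt low perm := by
  induction n with
  | zero =>
    intro perm hlen low
    have hnil : perm = [] := List.eq_nil_of_length_eq_zero (by omega)
    subst hnil
    rw [decr_perm]
    simp [decr_perm_alt, pvBuildTable, pvSelect]
  | succ n ihn =>
    intro perm hlen low
    rw [decr_perm]
    by_cases hnil : perm = []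
    · subst hnil
      simp [decr_perm_alt, pvBuildTable, pvSelect]
    · rw [if_neg hnil]
      have IH : ∀ q : List Int, q.length < perm.length → ∀ l, decr_perm l q = decr_perm_alt l q := by
        intro q hq l
        exact ihn q (by omega) l
      by_cases hmin : low < ((PySem.List.min? perm (fun x => x)).getD 0)
      · rw [if_pos hmin]
        obtain ⟨x, rest, rfl⟩ := List.exists_cons_of_ne_nil hnil
        have hm : PySem.List.min? (x :: rest) (fun y => y) = some (rest.foldl min x) :=
          PySem.List.min?_id_cons x rest
        have hlt : ∀ y ∈ (x :: rest), ¬ y < low := by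
          intro y hy hylt
          have := PySem.List.min?_isMin hm y hy
          rw [hm] at hmin
          simp at hmin this
          omega
        have hsel : pvSelect low (pvBuildTable (x :: rest)) = [] := by
          apply pvSelect_nil_of_head
          intro r hrmem
          exact hlt _ (pvBuildTable_head_mem _ r hrmem)
        simp [decr_perm_alt, hsel]
      · rw [if_neg hmin]
        rw [pvFoldlAttachVal (List.range perm.length)
          (fun (st : List Int × List Int) (index : Nat) =>
            let dec :=
              if low > PySem.List.pyGetD perm (index : Int) 0 then
                low :: decr_perm (PySem.List.pyGetD perm (index : Int) 0)
                         (PySem.List.slice perm (some ((index : Int) + 1)) none)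
              else st.2
            let dec_perms := if dec.length ≥ st.1.length then dec else st.1
            (dec_perms, dec)) ([low], [])]
        rw [List.range_eq_range']
        obtain ⟨dec', hloop⟩ := decr_perm_loop_eq low perm IH perm.length 0 [] [] (by omega)
          (Or.inr (by simp))
        rw [hloop]
        simp [decr_perm_alt, pvSelect]

-- ===== VERDICT (by name: the statement is the Claim_ definition above) =====
theorem decr_perm_spec : Claim_equal_decr_perm := by
  intro low perm _
  unfold Spec_decr_perm
  exact decr_perm_eq perm.length perm le_rfl low
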